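-- pv_equiv track=rewrite | github.com/aenon0/Competitive-Programming-Odyssey | find_nearest_point_that_has_the_same_x_or_y_coordinate.py | nearestValidPoint
-- ===== SOURCE A (Python) =====
-- from typing import List
--
-- def nearestValidPoint(x: int, y: int, points: List[List[int]]) -> int:
--     min_difference = float("inf")
--     ans = [ ]
--     for indx in range(len(points)):
--
--         if x == points[indx][0] or y == points[indx][1]:
--             m_distance = abs(x -  points[indx][0]) + abs( y - points[indx][1])
--             if m_distance < min_difference:
--                 min_difference = m_distance
--                 ans.append(indx)
--
--     if not ans:
--         return -1
--     return ans[-1]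
-- ===== SOURCE B (Python) =====
-- def nearestValidPoint(x, y, points):
--     order = sorted(range(len(points)),
--                    key=lambda i: (abs(x - points[i][0]) + abs(y - points[i][1]), i))
--     for i in order:
--         if points[i][0] == x or points[i][1] == y:
--             return i
--     return -1
-- ===== Notes on version B (the rewrite author's own statement) =====
-- stated objective: alternative
-- what changed: Replaces A's single-pass running-minimum scan (candidate list + ans[-1]) by a staged sort-then-scan: sort all indices by the (manhattan distance, index) key, then return the first index in that order whose point shares x or y, with -1 if the scan finds none.
import Mathlib
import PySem

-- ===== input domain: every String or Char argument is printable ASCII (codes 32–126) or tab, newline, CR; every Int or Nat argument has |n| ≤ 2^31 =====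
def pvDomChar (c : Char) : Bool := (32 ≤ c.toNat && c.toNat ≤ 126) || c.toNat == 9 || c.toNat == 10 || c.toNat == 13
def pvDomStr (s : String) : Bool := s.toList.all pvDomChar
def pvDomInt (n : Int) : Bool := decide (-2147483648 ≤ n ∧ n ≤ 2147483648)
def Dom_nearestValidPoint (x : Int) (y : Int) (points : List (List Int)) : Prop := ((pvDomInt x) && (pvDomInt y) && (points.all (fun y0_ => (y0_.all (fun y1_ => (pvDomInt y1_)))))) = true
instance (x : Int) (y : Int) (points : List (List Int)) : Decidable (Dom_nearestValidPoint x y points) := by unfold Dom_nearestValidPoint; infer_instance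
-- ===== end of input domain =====

-- B replaces A's single-pass running-minimum scan by a staged sort-then-scan:
-- sort all indices by the (manhattan distance, index) key, then return the first
-- index in that order whose point shares x or y (objective: alternative).

-- ===== PORT A =====
-- loop body of A: one iteration of 'for indx in range(len(points))'
def nvpBodyA (x : Int) (y : Int) (points : List (List Int))
    (st : Option Int × List Int) (indx : Int) : Option Int × List Int :=
  let p := PySem.List.pyGetD points indx []
  if x = PySem.List.pyGetD p 0 0 ∨ y = PySem.List.pyGetD p 1 0 then
    let m := |x - PySem.List.pyGetD p 0 0| + |y - PySem.List.pyGetD p 1 0|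
    match st.1 with
    | none => (some m, st.2 ++ [indx])            -- min_difference = inf: m < inf always
    | some md => if m < md then (some m, st.2 ++ [indx]) else st
  else st

def nearestValidPoint (x : Int) (y : Int) (points : List (List Int)) : Int :=
  let st := (PySem.List.pyRange 0 (points.length : Int) 1).foldl (nvpBodyA x y points) (none, [])
  match st.2.getLast? with                         -- 'if not ans: return -1; return ans[-1]'
  | none => -1
  | some v => v

-- ===== PORT B =====
-- the sort key 'lambda i: (abs(x-points[i][0]) + abs(y-points[i][1]), i)' — first component
def nvpDist (x : Int) (y : Int) (points : List (List Int)) (i : Int) : Int :=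
  let p := PySem.List.pyGetD points i []
  |x - PySem.List.pyGetD p 0 0| + |y - PySem.List.pyGetD p 1 0|

-- the scan condition 'points[i][0] == x or points[i][1] == y'
def nvpValid (x : Int) (y : Int) (points : List (List Int)) (i : Int) : Bool :=
  let p := PySem.List.pyGetD points i []
  decide (PySem.List.pyGetD p 0 0 = x) || decide (PySem.List.pyGetD p 1 0 = y)

def nearestValidPoint_alt (x : Int) (y : Int) (points : List (List Int)) : Int :=
  let order := PySem.List.sorted2 (PySem.List.pyRange 0 (points.length : Int) 1)
      (nvpDist x y points) (fun i => i)            -- sorted(range(len(points)), key=…) (tuple key)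
  match order.find? (nvpValid x y points) with     -- 'for i in order: if …: return i'
  | some i => i
  | none => -1                                     -- fell through the loop

-- ===== PRECONDITION & SPEC =====
-- Pre_ excludes exactly the inputs where A raises IndexError: some point has fewer than two coordinates.
def Pre_nearestValidPoint (_x : Int) (_y : Int) (points : List (List Int)) : Prop :=
  ∀ p ∈ points, 2 ≤ p.length
instance (x : Int) (y : Int) (points : List (List Int)) : Decidable (Pre_nearestValidPoint x y points) := by unfold Pre_nearestValidPoint; infer_instance

def pvWitness_nearestValidPoint : Int × Int × List (List Int) := (1, 2, [[3, 2], [1, 5], [0, 0]])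

def Spec_nearestValidPoint (x : Int) (y : Int) (points : List (List Int)) (out : Int) : Prop := out = nearestValidPoint_alt x y points
instance (x : Int) (y : Int) (points : List (List Int)) (out : Int) : Decidable (Spec_nearestValidPoint x y points out) := by unfold Spec_nearestValidPoint; infer_instance

-- ===== CLAIM (what is proved, stated in full; the proofs are below) =====
def Claim_equal_nearestValidPoint : Prop := ∀ (x : Int) (y : Int) (points : List (List Int)), Dom_nearestValidPoint x y points → Pre_nearestValidPoint x y points → Spec_nearestValidPoint x y points (nearestValidPoint x y points)

-- ===== LEMMAS AND PROOFS =====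

-- the strict lexicographic 'before' relation sorted2 uses for the key i ↦ (d i, i)
def nvpBlt (d : Int → Int) (a b : Int) : Bool :=
  decide (d a < d b) || (!decide (d b < d a) && decide (a < b))

theorem nvpBlt_iff (d : Int → Int) (a b : Int) :
    nvpBlt d a b = true ↔ (d a < d b ∨ (d a ≤ d b ∧ a < b)) := by
  simp only [nvpBlt, Bool.or_eq_true, Bool.and_eq_true, Bool.not_eq_true',
    decide_eq_true_eq, decide_eq_false_iff_not]
  omega

theorem nvpBlt_trans (d : Int → Int) {a b c : Int}
    (h1 : nvpBlt d a b = true) (h2 : nvpBlt d b c = true) : nvpBlt d a c = true := by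
  rw [nvpBlt_iff] at *; omega

theorem nvpBlt_total (d : Int → Int) {a b : Int}
    (h : ¬ nvpBlt d a b = true) (hne : a ≠ b) : nvpBlt d b a = true := by
  rw [nvpBlt_iff] at *; omega

theorem nvpBlt_asymm (d : Int → Int) {a b : Int}
    (h1 : nvpBlt d a b = true) (h2 : nvpBlt d b a = true) : False := by
  rw [nvpBlt_iff] at *; omega

-- inserting a fresh element with insertBy keeps the list sorted by nvpBlt
theorem insertBy_pairwise_nvpBlt (d : Int → Int) (x : Int) :
    ∀ (ys : List Int), ys.Pairwise (fun a b => nvpBlt d a b = true) →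
      (∀ y ∈ ys, y ≠ x) →
      (PySem.List.insertBy (nvpBlt d) x ys).Pairwise (fun a b => nvpBlt d a b = true) := by
  intro ys
  induction ys with
  | nil => intro _ _; simp [PySem.List.insertBy]
  | cons y t ih =>
    intro hp hne
    rw [List.pairwise_cons] at hp
    show (if nvpBlt d x y = true then x :: y :: t else y :: PySem.List.insertBy (nvpBlt d) x t).Pairwise _
    split_ifs with hb
    · refine List.pairwise_cons.2 ⟨?_, List.pairwise_cons.2 ⟨hp.1, hp.2⟩⟩
      intro z hz
      rcases List.mem_cons.1 hz with hz | hz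
      · exact hz ▸ hb
      · exact nvpBlt_trans d hb (hp.1 z hz)
    · refine List.pairwise_cons.2 ⟨?_, ih hp.2 (fun z hz => hne z (List.mem_cons_of_mem y hz))⟩
      intro z hz
      rw [PySem.List.insertBy_mem_iff] at hz
      rcases hz with hz | hz
      · subst hz
        exact nvpBlt_total d (by simpa using hb) (fun h => hne y (List.mem_cons_self) h.symm)
      · exact hp.1 z hz
  
theorem foldl_insertBy_pairwise_nvpBlt (d : Int → Int) :
    ∀ (xs acc : List Int), xs.Nodup → (∀ a ∈ acc, a ∉ xs) →
      acc.Pairwise (fun a b => nvpBlt d a b = true) →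
      (xs.foldl (fun acc x => PySem.List.insertBy (nvpBlt d) x acc) acc).Pairwise
        (fun a b => nvpBlt d a b = true) := by
  intro xs
  induction xs with
  | nil => intro acc _ _ hp; simpa using hp
  | cons z t ih =>
    intro acc hnd hdisj hp
    rw [List.nodup_cons] at hnd
    simp only [List.foldl_cons]
    apply ih _ hnd.2
    · intro a ha
      rw [PySem.List.insertBy_mem_iff] at ha
      rcases ha with ha | ha
      · subst ha; exact hnd.1
      · intro hmem
        exact hdisj a ha (List.mem_cons_of_mem z hmem)
    · exact insertBy_pairwise_nvpBlt d z acc hp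
        (fun a ha h => hdisj a ha (by rw [h]; exact List.mem_cons_self))

-- B's sorted call, as a fold of insertBy with nvpBlt
theorem sorted2_eq_foldl (d : Int → Int) (xs : List Int) :
    PySem.List.sorted2 xs d (fun i => i) false
      = xs.foldl (fun acc x => PySem.List.insertBy (nvpBlt d) x acc) [] := rfl

theorem sorted2_pairwise_nvpBlt (d : Int → Int) (xs : List Int) (hnd : xs.Nodup) :
    (PySem.List.sorted2 xs d (fun i => i) false).Pairwise (fun a b => nvpBlt d a b = true) := by
  rw [sorted2_eq_foldl]
  exact foldl_insertBy_pairwise_nvpBlt d xs [] hnd (by simp) (by simp)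

-- find? on a nvpBlt-sorted list returns a lex-minimal valid element
theorem find?_sorted_min (d : Int → Int) (v : Int → Bool) :
    ∀ (L : List Int), L.Pairwise (fun a b => nvpBlt d a b = true) →
      ∀ i, L.find? v = some i →
        v i = true ∧ i ∈ L ∧ ∀ j ∈ L, v j = true → i = j ∨ nvpBlt d i j = true := by
  intro L
  induction L with
  | nil => intro _ i h; simp at h
  | cons h t ih =>
    intro hp i hf
    rw [List.pairwise_cons] at hp
    cases hv : v h with
    | true =>
      rw [List.find?_cons_of_pos hv] at hf
      cases hf
      refine ⟨hv, List.mem_cons_self, ?_⟩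
      intro j hj _
      rcases List.mem_cons.1 hj with hj | hj
      · exact Or.inl hj.symm
      · exact Or.inr (hp.1 j hj)
    | false =>
      rw [List.find?_cons_of_neg (by simp [hv])] at hf
      have := ih hp.2 i hf
      refine ⟨this.1, List.mem_cons_of_mem h this.2.1, ?_⟩
      intro j hj hvj
      rcases List.mem_cons.1 hj with hj | hj
      · exact absurd hvj (by subst hj; simp [hv])
      · exact this.2.2 j hj hvj

-- ===== A-side: the loop state of A, rewritten over enumerate =====
def nvpStepA (x : Int) (y : Int) (st : Option Int × List Int) (ip : Int × List Int) :
    Option Int × List Int :=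
  if x = PySem.List.pyGetD ip.2 0 0 ∨ y = PySem.List.pyGetD ip.2 1 0 then
    let m := |x - PySem.List.pyGetD ip.2 0 0| + |y - PySem.List.pyGetD ip.2 1 0|
    match st.1 with
    | none => (some m, st.2 ++ [ip.1])
    | some md => if m < md then (some m, st.2 ++ [ip.1]) else st
  else st

-- running lex-min over (dist, index) pairs — what A's state amounts to
def nvpStepB (acc : Option (Int × Int)) (p : Int × Int) : Option (Int × Int) :=
  match acc with
  | none => some p
  | some m => if (decide (p.1 < m.1) || !decide (m.1 < p.1) && decide (p.2 < m.2)) = true then some p else some m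

def nvpPair (x : Int) (y : Int) (ip : Int × List Int) : Option (Int × Int) :=
  let px := PySem.List.pyGetD ip.2 0 0
  let py := PySem.List.pyGetD ip.2 1 0
  if x = px ∨ y = py then some (|x - px| + |y - py|, ip.1) else none

theorem nvp_loop_inv (x y : Int) :
    ∀ (ps : List (List Int)) (s : Int) (md : Option Int) (ans : List Int)
      (acc : Option (Int × Int)),
      md = acc.map (·.1) → ans.getLast? = acc.map (·.2) →
      (∀ d i, acc = some (d, i) → i < s) →
      (((PySem.List.enumerate ps s).foldl (nvpStepA x y) (md, ans)).1
          = (((PySem.List.enumerate ps s).filterMap (nvpPair x y)).foldl nvpStepB acc).map (·.1))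
      ∧ (((PySem.List.enumerate ps s).foldl (nvpStepA x y) (md, ans)).2.getLast?
          = (((PySem.List.enumerate ps s).filterMap (nvpPair x y)).foldl nvpStepB acc).map (·.2))
      ∧ (∀ d i, ((PySem.List.enumerate ps s).filterMap (nvpPair x y)).foldl nvpStepB acc = some (d, i)
          → i < s + ps.length) := by
  intro ps
  induction ps with
  | nil =>
    intro s md ans acc h1 h2 h3
    simp [PySem.List.enumerate, h1, h2]
    intro d i h
    have := h3 d i h
    omega
  | cons p t ih =>
    intro s md ans acc h1 h2 h3
    have henum : PySem.List.enumerate (p :: t) s = (s, p) :: PySem.List.enumerate t (s + 1) := by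
      simp [PySem.List.enumerate]
    rw [henum]
    by_cases hc : x = PySem.List.pyGetD p 0 0 ∨ y = PySem.List.pyGetD p 1 0
    · have hpair : nvpPair x y (s, p)
          = some (|x - PySem.List.pyGetD p 0 0| + |y - PySem.List.pyGetD p 1 0|, s) := by
        simp [nvpPair, hc]
      set m := |x - PySem.List.pyGetD p 0 0| + |y - PySem.List.pyGetD p 1 0| with hm
      match hacc : acc with
      | none =>
        subst h1
        have hans : ans = [] := by simpa using h2
        subst hans
        have hstep : nvpStepA x y (Option.map (·.1) (none : Option (Int × Int)), ([] : List Int)) (s, p)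
            = (some m, [s]) := by
          simp [nvpStepA, hc, hm]
        simp only [List.foldl_cons, List.filterMap_cons, hpair, hstep]
        have hrec := ih (s + 1) (some m) [s] (some (m, s)) rfl rfl
          (by intro d i h; simp at h; omega)
        refine ⟨hrec.1, hrec.2.1, ?_⟩
        intro d i h
        have := hrec.2.2 d i h
        simp only [List.length_cons]
        omega
      | some mi =>
        obtain ⟨dm, im⟩ := mi
        subst h1
        have him : im < s := h3 dm im rfl
        simp only [List.foldl_cons, List.filterMap_cons, hpair]
        by_cases hlt : m < dm
        · have hstep : nvpStepA x y (Option.map (·.1) (some (dm, im)), ans) (s, p)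
              = (some m, ans ++ [s]) := by
            unfold nvpStepA
            rw [if_pos hc]
            simp only [Option.map_some]
            rw [if_pos hlt]
          have hB : nvpStepB (some (dm, im)) (m, s) = some (m, s) := by
            simp [nvpStepB, hlt]
          simp only [hstep, hB]
          have hrec := ih (s + 1) (some m) (ans ++ [s]) (some (m, s)) rfl (by simp)
            (by intro d i h; simp at h; omega)
          refine ⟨hrec.1, hrec.2.1, ?_⟩
          intro d i h
          have := hrec.2.2 d i h
          simp only [List.length_cons]
          omega
        · have hstep : nvpStepA x y (Option.map (·.1) (some (dm, im)), ans) (s, p)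
              = (Option.map (·.1) (some (dm, im)), ans) := by
            unfold nvpStepA
            rw [if_pos hc]
            simp only [Option.map_some]
            rw [if_neg hlt]
          have hB : nvpStepB (some (dm, im)) (m, s) = some (dm, im) := by
            have h1' : ¬ (m < dm) := hlt
            have h2' : ¬ (s < im) := by omega
            simp [nvpStepB, h1', h2']
          simp only [hstep, hB]
          have hrec := ih (s + 1) (some dm) ans (some (dm, im)) rfl h2
            (by intro d i h; simp at h; omega)
          refine ⟨hrec.1, hrec.2.1, ?_⟩
          intro d i h
          have := hrec.2.2 d i h
          simp only [List.length_cons]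
          omega
    · have hstep : nvpStepA x y (md, ans) (s, p) = (md, ans) := by
        simp [nvpStepA, hc]
      have hpair : nvpPair x y (s, p) = none := by
        simp [nvpPair, hc]
      simp only [List.foldl_cons, List.filterMap_cons, hpair, hstep]
      have hrec := ih (s + 1) md ans acc h1 h2
        (by intro d i h; have := h3 d i h; omega)
      refine ⟨hrec.1, hrec.2.1, ?_⟩
      intro d i h
      have := hrec.2.2 d i h
      simp only [List.length_cons]
      omega

theorem nvp_range_to_enumerate (x y : Int) (points : List (List Int)) :
    (PySem.List.pyRange 0 (points.length : Int) 1).foldl (nvpBodyA x y points) (none, [])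
      = (PySem.List.enumerate points 0).foldl (nvpStepA x y) (none, []) := by
  have he : PySem.List.enumerate points 0
      = (PySem.List.pyRange 0 (PySem.List.len points) 1).map
          (fun j => (j, PySem.List.pyGetD points j ([] : List Int))) :=
    PySem.List.enumerate_eq_map_pyRange points ([] : List Int)
  rw [he, List.foldl_map]
  have hlen : PySem.List.len points = (points.length : Int) := by
    simp [PySem.List.len]
  rw [hlen]
  apply PySem.List.foldl_congr_mem
  intro st j _
  simp [nvpBodyA, nvpStepA]

-- the pairs A effectively minimises over: encoded valid indices
theorem nvp_pairs_eq (x y : Int) (points : List (List Int)) :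
    (PySem.List.enumerate points 0).filterMap (nvpPair x y)
      = (((PySem.List.pyRange 0 (points.length : Int) 1).filter (nvpValid x y points)).map
          (fun j => (nvpDist x y points j, j))) := by
  have he : PySem.List.enumerate points 0
      = (PySem.List.pyRange 0 (PySem.List.len points) 1).map
          (fun j => (j, PySem.List.pyGetD points j ([] : List Int))) :=
    PySem.List.enumerate_eq_map_pyRange points ([] : List Int)
  have hlen : PySem.List.len points = (points.length : Int) := by
    simp [PySem.List.len]
  rw [he, hlen, List.filterMap_map]
  have hpt : ∀ j : Int, (nvpPair x y ∘ fun j => (j, PySem.List.pyGetD points j ([] : List Int))) j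
      = if nvpValid x y points j then some (nvpDist x y points j, j) else none := by
    intro j
    simp only [Function.comp, nvpPair, nvpValid, nvpDist]
    by_cases hc : PySem.List.pyGetD (PySem.List.pyGetD points j []) 0 0 = x
        ∨ PySem.List.pyGetD (PySem.List.pyGetD points j []) 1 0 = y
    · rw [if_pos (by tauto), if_pos (by simp; tauto)]
    · rw [if_neg (by tauto), if_neg (by simp; tauto)]
  rw [List.filterMap_congr (fun j _ => hpt j)]
  generalize PySem.List.pyRange 0 (points.length : Int) 1 = l
  induction l with
  | nil => simp
  | cons a l ihl =>
    rw [List.filterMap_cons, List.filter_cons]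
    by_cases hv : nvpValid x y points a
    · rw [if_pos hv, if_pos hv, List.map_cons, ihl]
    · rw [if_neg hv, if_neg (by simp [hv]), ihl]

theorem nvpStepB_some (d : Int → Int) (a b : Int) :
    nvpStepB (some (d b, b)) (d a, a)
      = if nvpBlt d a b = true then some (d a, a) else some (d b, b) := rfl

-- fold of nvpStepB over encoded pairs: the result is the encoded lex-min
theorem nvp_fold_min (d : Int → Int) :
    ∀ (qs : List Int) (i0 : Int),
      ∃ r, (qs.map (fun j => (d j, j))).foldl nvpStepB (some (d i0, i0)) = some (d r, r)
        ∧ r ∈ i0 :: qs ∧ ∀ j ∈ i0 :: qs, r = j ∨ nvpBlt d r j = true := by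
  intro qs
  induction qs with
  | nil =>
    intro i0
    exact ⟨i0, by simp, List.mem_cons_self, by intro j hj; simp at hj; subst hj; exact Or.inl rfl⟩
  | cons q t ih =>
    intro i0
    simp only [List.map_cons, List.foldl_cons]
    by_cases hb : nvpBlt d q i0 = true
    · have hstep : nvpStepB (some (d i0, i0)) (d q, q) = some (d q, q) := by
        rw [nvpStepB_some, if_pos hb]
      rw [hstep]
      obtain ⟨r, hr, hmem, hmin⟩ := ih q
      refine ⟨r, hr, ?_, ?_⟩
      · rcases List.mem_cons.1 hmem with h | h
        · exact List.mem_cons_of_mem i0 (h ▸ List.mem_cons_self)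
        · exact List.mem_cons_of_mem i0 (List.mem_cons_of_mem q h)
      · intro j hj
        rcases List.mem_cons.1 hj with hj | hj
        · subst hj
          rcases hmin q List.mem_cons_self with h | h
          · exact Or.inr (h ▸ hb)
          · exact Or.inr (nvpBlt_trans d h hb)
        · exact hmin j hj
    · have hstep : nvpStepB (some (d i0, i0)) (d q, q) = some (d i0, i0) := by
        rw [nvpStepB_some, if_neg hb]
      rw [hstep]
      obtain ⟨r, hr, hmem, hmin⟩ := ih i0
      refine ⟨r, hr, ?_, ?_⟩
      · rcases List.mem_cons.1 hmem with h | h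
        · exact h ▸ List.mem_cons_self
        · exact List.mem_cons_of_mem i0 (List.mem_cons_of_mem q h)
      · intro j hj
        rcases List.mem_cons.1 hj with hj | hj
        · subst hj; exact hmin j List.mem_cons_self
        · rcases List.mem_cons.1 hj with hj | hj
          · -- j = q, dropped element
            rw [hj]
            by_cases hq : q = i0
            · rw [hq]; exact hmin i0 List.mem_cons_self
            · have hi0q : nvpBlt d i0 q = true := nvpBlt_total d hb hq
              rcases hmin i0 List.mem_cons_self with h | h
              · rw [h]; exact Or.inr hi0q
              · exact Or.inr (nvpBlt_trans d h hi0q)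
          · exact hmin j (List.mem_cons_of_mem i0 hj)

-- ===== main equivalence =====
theorem nearestValidPoint_spec' (x y : Int) (points : List (List Int)) :
    nearestValidPoint x y points = nearestValidPoint_alt x y points := by
  -- A computes the second component of the lex-min over the encoded valid indices
  have hA : nearestValidPoint x y points
      = (match (((PySem.List.pyRange 0 (points.length : Int) 1).filter (nvpValid x y points)).map
            (fun j => (nvpDist x y points j, j))).foldl nvpStepB none with
        | none => (-1 : Int)
        | some m => m.2) := by
    have h := nvp_loop_inv x y points 0 none [] none rfl rfl (by intro d i h; cases h)
    have hA0 : nearestValidPoint x y points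
        = (match ((PySem.List.pyRange 0 (points.length : Int) 1).foldl (nvpBodyA x y points)
              (none, [])).2.getLast? with
          | none => (-1 : Int)
          | some v => v) := rfl
    rw [hA0, nvp_range_to_enumerate, h.2.1, nvp_pairs_eq]
    cases (((PySem.List.pyRange 0 (points.length : Int) 1).filter (nvpValid x y points)).map
        (fun j => (nvpDist x y points j, j))).foldl nvpStepB none <;> simp
  rw [hA]
  have hB0 : nearestValidPoint_alt x y points
      = (match (PySem.List.sorted2 (PySem.List.pyRange 0 (points.length : Int) 1)
            (nvpDist x y points) (fun i => i) false).find? (nvpValid x y points) with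
        | some i => i
        | none => (-1 : Int)) := rfl
  rw [hB0]
  have hperm := PySem.List.sorted2_perm (PySem.List.pyRange 0 (points.length : Int) 1)
      (nvpDist x y points) (fun i => i) false
  have hmemL : ∀ j : Int, j ∈ PySem.List.sorted2 (PySem.List.pyRange 0 (points.length : Int) 1)
      (nvpDist x y points) (fun i => i) false ↔ j ∈ PySem.List.pyRange 0 (points.length : Int) 1 :=
    fun j => hperm.mem_iff
  have hpw := sorted2_pairwise_nvpBlt (nvpDist x y points)
      (PySem.List.pyRange 0 (points.length : Int) 1) (PySem.List.nodup_pyRange_one 0 _)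
  cases hqs : (PySem.List.pyRange 0 (points.length : Int) 1).filter (nvpValid x y points) with
  | nil =>
    -- no valid index: A returns -1, B's scan finds nothing
    have hnone : (PySem.List.sorted2 (PySem.List.pyRange 0 (points.length : Int) 1)
        (nvpDist x y points) (fun i => i) false).find? (nvpValid x y points) = none := by
      rw [List.find?_eq_none]
      intro j hj hv
      have : j ∈ (PySem.List.pyRange 0 (points.length : Int) 1).filter (nvpValid x y points) :=
        List.mem_filter.2 ⟨(hmemL j).1 hj, hv⟩
      rw [hqs] at this
      cases this
    rw [hnone]
    simp
  | cons q t =>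
    -- A's value: the lex-min r over q :: t
    obtain ⟨r, hr, hmem, hmin⟩ := nvp_fold_min (nvpDist x y points) t q
    simp only [List.map_cons, List.foldl_cons]
    have hstart : nvpStepB none (nvpDist x y points q, q) = some (nvpDist x y points q, q) := rfl
    rw [hstart, hr]
    -- facts about r
    have hrqs : r ∈ (PySem.List.pyRange 0 (points.length : Int) 1).filter (nvpValid x y points) := by
      rw [hqs]; exact hmem
    have hrR : r ∈ PySem.List.pyRange 0 (points.length : Int) 1 := (List.mem_filter.1 hrqs).1
    have hrv : nvpValid x y points r = true := (List.mem_filter.1 hrqs).2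
    -- B's scan succeeds: r is a valid member of the sorted list
    cases hf : (PySem.List.sorted2 (PySem.List.pyRange 0 (points.length : Int) 1)
        (nvpDist x y points) (fun i => i) false).find? (nvpValid x y points) with
    | none =>
      rw [List.find?_eq_none] at hf
      exact absurd hrv (hf r ((hmemL r).2 hrR))
    | some i =>
      obtain ⟨hiv, hiL, himin⟩ := find?_sorted_min (nvpDist x y points) (nvpValid x y points) _ hpw i hf
      -- i is a valid index, hence in q :: t; r and i are both lex-minimal, so equal
      have hiqs : i ∈ (PySem.List.pyRange 0 (points.length : Int) 1).filter (nvpValid x y points) :=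
        List.mem_filter.2 ⟨(hmemL i).1 hiL, hiv⟩
      rw [hqs] at hiqs
      have h1 := hmin i hiqs
      have h2 := himin r ((hmemL r).2 hrR) hrv
      show r = i
      rcases h1 with h1 | h1
      · exact h1
      · rcases h2 with h2 | h2
        · exact h2.symm
        · exact absurd h1 (fun h => nvpBlt_asymm (nvpDist x y points) h h2)

-- ===== VERDICT (by name: the statement is the Claim_ definition above) =====
theorem nearestValidPoint_spec : Claim_equal_nearestValidPoint := by
  intro x y points _ _
  exact nearestValidPoint_spec' x y points
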